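-- pv_equiv track=rewrite | github.com/alexanderGerbik/dite | tests/test_cycles.py | generate_cycle_shifts
-- ===== SOURCE A (Python) =====
-- def generate_cycle_shifts(cycle):
--     shifted = []
--     for i in range(len(cycle)):
--         shifted_cycle = cycle[i:] + cycle[:i]
--         shifted_cycle.append(shifted_cycle[0])
--
--         shifted.append(shifted_cycle)
--     shifted = [' -> '.join(o) for o in shifted]
--     return shifted
-- ===== SOURCE B (Python) =====
-- def generate_cycle_shifts(cycle):
--     out = []
--     cur = list(cycle)
--     for _ in cycle:
--         out.append(' -> '.join(cur + cur[:1]))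
--         cur.append(cur.pop(0))
--     return out
-- ===== Notes on version B (the rewrite author's own statement) =====
-- stated objective: alternative
-- what changed: B maintains a single running rotation, moving the head to the tail with pop(0)/append each iteration and emitting the joined string immediately, instead of A's index-driven recomputation of every rotation from two fresh slices followed by a separate join pass.
import Mathlib
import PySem

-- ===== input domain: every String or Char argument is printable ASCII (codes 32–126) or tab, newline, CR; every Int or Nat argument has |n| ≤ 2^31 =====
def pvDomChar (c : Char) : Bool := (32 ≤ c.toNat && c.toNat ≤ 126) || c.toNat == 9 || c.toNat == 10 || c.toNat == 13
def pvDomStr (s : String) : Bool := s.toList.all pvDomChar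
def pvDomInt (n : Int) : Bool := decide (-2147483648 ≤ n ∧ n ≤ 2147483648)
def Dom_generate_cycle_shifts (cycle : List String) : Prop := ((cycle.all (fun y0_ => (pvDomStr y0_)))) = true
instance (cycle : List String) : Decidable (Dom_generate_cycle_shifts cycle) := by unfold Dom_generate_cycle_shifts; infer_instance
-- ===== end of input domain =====

-- B maintains one running rotation (head moved to the tail each iteration) and emits each joined string immediately, instead of A's index-driven slicing of fresh rotations plus a second join pass (objective: alternative; same cost).


-- ===== PORT A =====
def generate_cycle_shifts (cycle : List String) : List String :=
  let shifted : List (List String) :=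
    (PySem.List.pyRange 0 (cycle.length : Int) 1).foldl
      (fun acc i =>
        let shifted_cycle :=
          PySem.List.slice cycle (some i) none ++ PySem.List.slice cycle none (some i)
        -- shifted_cycle.append(shifted_cycle[0]); index 0 is always in range inside the loop
        let shifted_cycle := shifted_cycle ++ (PySem.List.pyGet? shifted_cycle 0).toList
        acc ++ [shifted_cycle]) []
  shifted.map (fun o => PySem.Str.join " -> " o)

-- ===== PORT B =====
-- one step of B's loop body: cur.append(cur.pop(0)) after emitting ' -> '.join(cur + cur[:1]);
-- pop(0)/cur[0] are always in range (cur keeps cycle's length), so the [] branch is unreachable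
def pvStepB (st : List String × List String) : List String × List String :=
  match st.1 with
  | [] => st
  | h :: t => (t ++ [h], st.2 ++ [PySem.Str.join " -> " (st.1 ++ st.1.take 1)])

def generate_cycle_shifts_alt (cycle : List String) : List String :=
  (cycle.foldl (fun st _ => pvStepB st) (cycle, ([] : List String))).2

-- ===== PRECONDITION & SPEC =====
def Spec_generate_cycle_shifts (cycle : List String) (out : List String) : Prop := out = generate_cycle_shifts_alt cycle
instance (cycle : List String) (out : List String) : Decidable (Spec_generate_cycle_shifts cycle out) := by unfold Spec_generate_cycle_shifts; infer_instance

-- ===== CLAIM (what is proved, stated in full; the proofs are below) =====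
def Claim_equal_generate_cycle_shifts : Prop := ∀ (cycle : List String), Dom_generate_cycle_shifts cycle → Spec_generate_cycle_shifts cycle (generate_cycle_shifts cycle)

-- ===== LEMMAS AND PROOFS =====

-- the rotation B's loop maintains at step k
def pvRot (cycle : List String) (k : Nat) : List String := cycle.drop k ++ cycle.take k

-- one rotation step advances pvRot
lemma pvRot_succ (cycle : List String) (k : Nat) (hk : k < cycle.length) :
    pvStepB (pvRot cycle k, out) =
      (pvRot cycle (k + 1), out ++ [PySem.Str.join " -> " (pvRot cycle k ++ (pvRot cycle k).take 1)]) := by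
  have ht : cycle.take (k + 1) = cycle.take k ++ [cycle[k]] := by
    rw [List.take_add_one, List.getElem?_eq_getElem hk]; rfl
  have hd : pvRot cycle k = cycle[k] :: (cycle.drop (k + 1) ++ cycle.take k) := by
    unfold pvRot; rw [List.drop_eq_getElem_cons hk]; rfl
  rw [hd]
  simp only [pvStepB]
  rw [← hd]
  unfold pvRot
  rw [ht]
  simp [List.append_assoc]

-- B's fold, started at rotation k with fuel of length cycle.length - k, emits the remaining strings
lemma pvFoldB (cycle : List String) (fuel : List String) (k : Nat) (out : List String)
    (hk : k + fuel.length ≤ cycle.length) :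
    (fuel.foldl (fun st _ => pvStepB st) (pvRot cycle k, out)).2 =
      out ++ (List.range fuel.length).map
        (fun j => PySem.Str.join " -> " (pvRot cycle (k + j) ++ (pvRot cycle (k + j)).take 1)) := by
  induction fuel generalizing k out with
  | nil => simp
  | cons x fs ih =>
      simp only [List.foldl_cons]
      rw [pvRot_succ cycle k (by simp at hk; omega)]
      rw [ih (k + 1) _ (by simp at hk ⊢; omega)]
      rw [List.length_cons, List.range_succ_eq_map]
      simp only [List.map_cons, List.map_map, List.append_assoc, List.singleton_append,
        Nat.add_zero]
      congr 2
      refine List.map_congr_left ?_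
      intro j _
      simp only [Function.comp_apply, Nat.succ_eq_add_one]
      have h : k + 1 + j = k + (j + 1) := by omega
      rw [h]

-- for any list, l[0]? as a list is its first-element prefix
lemma toList_getElem?_zero (l : List String) : (l[0]?).toList = l.take 1 := by
  cases l <;> simp

theorem generate_cycle_shifts_spec : Claim_equal_generate_cycle_shifts := by
  intro cycle _
  unfold Spec_generate_cycle_shifts generate_cycle_shifts generate_cycle_shifts_alt
  have hB : cycle.foldl (fun st _ => pvStepB st) (cycle, ([] : List String)) =
      cycle.foldl (fun st _ => pvStepB st) (pvRot cycle 0, ([] : List String)) := by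
    unfold pvRot; simp
  rw [hB, pvFoldB cycle cycle 0 [] (by omega)]
  simp only [PySem.List.foldl_append_singleton_eq_map, List.nil_append, List.map_map]
  rw [show ((cycle.length : Int)) = ((cycle.length : Nat) : Int) from rfl,
    PySem.List.pyRange_zero_natCast, List.map_map]
  refine List.map_congr_left ?_
  intro k hk
  simp only [Function.comp, Nat.zero_add]
  rw [PySem.List.slice_from_natCast, PySem.List.slice_to_natCast,
    show (0 : Int) = ((0 : Nat) : Int) from rfl, PySem.List.pyGet?_natCast]
  rw [toList_getElem?_zero]
  rfl

-- ===== VERDICT (by name: the statement is the Claim_ definition above) =====
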